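-- pv_equiv track=rewrite | github.com/liweiwei90/riscv-isac | riscv_isac/fp_dataset.py | num_explain
-- ===== SOURCE A (Python) =====
-- fzero       = ['0x00000000', '0x80000000']
--
-- fminsubnorm = ['0x00000001', '0x80000001']
--
-- fsubnorm    = ['0x00000002', '0x80000002', '0x007FFFFE', '0x807FFFFE', '0x00555555', '0x80555555']
--
-- fmaxsubnorm = ['0x007FFFFF', '0x807FFFFF']
--
-- fminnorm    = ['0x00800000', '0x80800000']
--
-- fnorm       = ['0x00800001', '0x80800001', '0x00855555', '0x80855555', '0x008AAAAA', '0x808AAAAA', '0x55000000', '0xD5000000', '0x2A000000', '0xAA000000']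
--
-- fmaxnorm    = ['0x7F7FFFFF', '0xFF7FFFFF']
--
-- finfinity   = ['0x7F800000', '0xFF800000']
--
-- fdefaultnan = ['0x7FC00000', '0xFFC00000']
--
-- fqnan       = ['0x7FC00001', '0xFFC00001', '0x7FC55555', '0xFFC55555']
--
-- fsnan       = ['0x7F800001', '0xFF800001', '0x7FAAAAAA', '0xFFAAAAAA']
--
-- fone        = ['0x3F800000', '0xBF800000']
--
-- dzero       = ['0x0000000000000000', '0x8000000000000000']
--
-- dminsubnorm = ['0x0000000000000001', '0x8000000000000001']
--
-- dsubnorm    = ['0x0000000000000002', '0x8000000000000002']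
--
-- dmaxsubnorm = ['0x000FFFFFFFFFFFFF', '0x800FFFFFFFFFFFFF']
--
-- dminnorm    = ['0x0010000000000000', '0x8010000000000000']
--
-- dnorm       = ['0x0010000000000002', '0x8010000000000002']
--
-- dmaxnorm    = ['0x7FEFFFFFFFFFFFFF', '0xFFEFFFFFFFFFFFFF']
--
-- dinfinity   = ['0x7FF0000000000000', '0xFFF0000000000000']
--
-- ddefaultnan = ['0x7FF8000000000000', '0xFFF8000000000000']
--
-- dqnan       = ['0x7FF8000000000001', '0xFFF8000000000001']
--
-- dsnan       = ['0x7FF0000000000001', '0xFFF0000000000001']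
--
-- done        = ['0x3FF0000000000000', '0xBF80000000000000']
--
-- def num_explain(num):
-- 	num_dict = {
-- 		tuple(fzero) 		: 'fzero',
-- 		tuple(fminsubnorm) 	: 'fminsubnorm',
-- 		tuple(fsubnorm) 	: 'fsubnorm',
-- 		tuple(fmaxsubnorm) 	: 'fmaxsubnorm',
-- 		tuple(fminnorm) 	: 'fminnorm',
-- 		tuple(fnorm) 		: 'fnorm',
-- 		tuple(fmaxnorm) 	: 'fmaxnorm',
-- 		tuple(finfinity) 	: 'finfinity',
-- 		tuple(fdefaultnan) 	: 'fdefaultnan',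
-- 		tuple(fqnan) 		: 'fqnan',
-- 		tuple(fsnan) 		: 'fsnan',
-- 		tuple(fone) 		: 'fone',
-- 		tuple(dzero) 		: 'dzero',
-- 		tuple(dminsubnorm) 	: 'dminsubnorm',
-- 		tuple(dsubnorm) 	: 'dsubnorm',
-- 		tuple(dmaxsubnorm) 	: 'dmaxsubnorm',
-- 		tuple(dminnorm) 	: 'dminnorm',
-- 		tuple(dnorm) 		: 'dnorm',
-- 		tuple(dmaxnorm) 	: 'dmaxnorm',
-- 		tuple(dinfinity) 	: 'dinfinity',
-- 		tuple(ddefaultnan) 	: 'ddefaultnan',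
-- 		tuple(dqnan) 		: 'dqnan',
-- 		tuple(dsnan) 		: 'dsnan',
-- 		tuple(done) 		: 'done'
-- 	}
-- 	num_list = list(num_dict.items())
-- 	for i in range(len(num_list)):
-- 		if(num in num_list[i][0]):
-- 			return(num_list[i][1])
-- ===== SOURCE B (Python) =====
-- _TABLE = {
--     '0x00000000': 'fzero',
--     '0x80000000': 'fzero',
--     '0x00000001': 'fminsubnorm',
--     '0x80000001': 'fminsubnorm',
--     '0x00000002': 'fsubnorm',
--     '0x80000002': 'fsubnorm',
--     '0x007FFFFE': 'fsubnorm',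
--     '0x807FFFFE': 'fsubnorm',
--     '0x00555555': 'fsubnorm',
--     '0x80555555': 'fsubnorm',
--     '0x007FFFFF': 'fmaxsubnorm',
--     '0x807FFFFF': 'fmaxsubnorm',
--     '0x00800000': 'fminnorm',
--     '0x80800000': 'fminnorm',
--     '0x00800001': 'fnorm',
--     '0x80800001': 'fnorm',
--     '0x00855555': 'fnorm',
--     '0x80855555': 'fnorm',
--     '0x008AAAAA': 'fnorm',
--     '0x808AAAAA': 'fnorm',
--     '0x55000000': 'fnorm',
--     '0xD5000000': 'fnorm',
--     '0x2A000000': 'fnorm',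
--     '0xAA000000': 'fnorm',
--     '0x7F7FFFFF': 'fmaxnorm',
--     '0xFF7FFFFF': 'fmaxnorm',
--     '0x7F800000': 'finfinity',
--     '0xFF800000': 'finfinity',
--     '0x7FC00000': 'fdefaultnan',
--     '0xFFC00000': 'fdefaultnan',
--     '0x7FC00001': 'fqnan',
--     '0xFFC00001': 'fqnan',
--     '0x7FC55555': 'fqnan',
--     '0xFFC55555': 'fqnan',
--     '0x7F800001': 'fsnan',
--     '0xFF800001': 'fsnan',
--     '0x7FAAAAAA': 'fsnan',
--     '0xFFAAAAAA': 'fsnan',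
--     '0x3F800000': 'fone',
--     '0xBF800000': 'fone',
--     '0x0000000000000000': 'dzero',
--     '0x8000000000000000': 'dzero',
--     '0x0000000000000001': 'dminsubnorm',
--     '0x8000000000000001': 'dminsubnorm',
--     '0x0000000000000002': 'dsubnorm',
--     '0x8000000000000002': 'dsubnorm',
--     '0x000FFFFFFFFFFFFF': 'dmaxsubnorm',
--     '0x800FFFFFFFFFFFFF': 'dmaxsubnorm',
--     '0x0010000000000000': 'dminnorm',
--     '0x8010000000000000': 'dminnorm',
--     '0x0010000000000002': 'dnorm',
--     '0x8010000000000002': 'dnorm',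
--     '0x7FEFFFFFFFFFFFFF': 'dmaxnorm',
--     '0xFFEFFFFFFFFFFFFF': 'dmaxnorm',
--     '0x7FF0000000000000': 'dinfinity',
--     '0xFFF0000000000000': 'dinfinity',
--     '0x7FF8000000000000': 'ddefaultnan',
--     '0xFFF8000000000000': 'ddefaultnan',
--     '0x7FF8000000000001': 'dqnan',
--     '0xFFF8000000000001': 'dqnan',
--     '0x7FF0000000000001': 'dsnan',
--     '0xFFF0000000000001': 'dsnan',
--     '0x3FF0000000000000': 'done',
--     '0xBF80000000000000': 'done',
-- }
--
-- def num_explain(num):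
--     return _TABLE.get(num)
-- ===== Notes on version B (the rewrite author's own statement) =====
-- stated objective: idiomatic
-- what changed: A's loop over 24 category groups with a per-group membership scan is replaced by one flat literal dict mapping each hex string directly to its label, returned via a single table.get(num) with no loop at all.
import Mathlib
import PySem

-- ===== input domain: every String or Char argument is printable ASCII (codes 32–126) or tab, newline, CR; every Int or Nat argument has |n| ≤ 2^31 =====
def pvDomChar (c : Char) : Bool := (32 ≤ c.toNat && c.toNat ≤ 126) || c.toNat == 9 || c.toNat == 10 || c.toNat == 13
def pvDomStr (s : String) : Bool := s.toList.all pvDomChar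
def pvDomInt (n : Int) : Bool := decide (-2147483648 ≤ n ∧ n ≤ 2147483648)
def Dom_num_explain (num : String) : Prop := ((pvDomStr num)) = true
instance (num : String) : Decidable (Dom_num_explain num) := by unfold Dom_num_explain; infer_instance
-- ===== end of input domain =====

-- B replaces A's scan over hex groups with one flat literal dict keyed by each hex string (idiomatic direct lookup; same cost class).

-- ===== PORT A =====
-- the groups, in the order A's dict lists them (each group as (tuple, label))
def pvGroups : List (List String × String) := [
  (["0x00000000", "0x80000000"], "fzero"),
  (["0x00000001", "0x80000001"], "fminsubnorm"),
  (["0x00000002", "0x80000002", "0x007FFFFE", "0x807FFFFE", "0x00555555", "0x80555555"], "fsubnorm"),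
  (["0x007FFFFF", "0x807FFFFF"], "fmaxsubnorm"),
  (["0x00800000", "0x80800000"], "fminnorm"),
  (["0x00800001", "0x80800001", "0x00855555", "0x80855555", "0x008AAAAA", "0x808AAAAA", "0x55000000", "0xD5000000", "0x2A000000", "0xAA000000"], "fnorm"),
  (["0x7F7FFFFF", "0xFF7FFFFF"], "fmaxnorm"),
  (["0x7F800000", "0xFF800000"], "finfinity"),
  (["0x7FC00000", "0xFFC00000"], "fdefaultnan"),
  (["0x7FC00001", "0xFFC00001", "0x7FC55555", "0xFFC55555"], "fqnan"),
  (["0x7F800001", "0xFF800001", "0x7FAAAAAA", "0xFFAAAAAA"], "fsnan"),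
  (["0x3F800000", "0xBF800000"], "fone"),
  (["0x0000000000000000", "0x8000000000000000"], "dzero"),
  (["0x0000000000000001", "0x8000000000000001"], "dminsubnorm"),
  (["0x0000000000000002", "0x8000000000000002"], "dsubnorm"),
  (["0x000FFFFFFFFFFFFF", "0x800FFFFFFFFFFFFF"], "dmaxsubnorm"),
  (["0x0010000000000000", "0x8010000000000000"], "dminnorm"),
  (["0x0010000000000002", "0x8010000000000002"], "dnorm"),
  (["0x7FEFFFFFFFFFFFFF", "0xFFEFFFFFFFFFFFFF"], "dmaxnorm"),
  (["0x7FF0000000000000", "0xFFF0000000000000"], "dinfinity"),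
  (["0x7FF8000000000000", "0xFFF8000000000000"], "ddefaultnan"),
  (["0x7FF8000000000001", "0xFFF8000000000001"], "dqnan"),
  (["0x7FF0000000000001", "0xFFF0000000000001"], "dsnan"),
  (["0x3FF0000000000000", "0xBF80000000000000"], "done")]

-- the loop 'for i in range(len(num_list)): if num in num_list[i][0]: return num_list[i][1]' (falls through to None)
def pvLoopA (num : String) : List (List String × String) → Option String
| [] => none
| (g, l) :: rest => if g.contains num then some l else pvLoopA num rest

def num_explain (num : String) : Option String := pvLoopA num pvGroups

-- ===== PORT B =====
-- Source B's literal flat table _TABLE (a Python dict, one key per hex string)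
def pvTable : PySem.Dict String String := PySem.Dict.mk [
  ("0x00000000", "fzero"),
  ("0x80000000", "fzero"),
  ("0x00000001", "fminsubnorm"),
  ("0x80000001", "fminsubnorm"),
  ("0x00000002", "fsubnorm"),
  ("0x80000002", "fsubnorm"),
  ("0x007FFFFE", "fsubnorm"),
  ("0x807FFFFE", "fsubnorm"),
  ("0x00555555", "fsubnorm"),
  ("0x80555555", "fsubnorm"),
  ("0x007FFFFF", "fmaxsubnorm"),
  ("0x807FFFFF", "fmaxsubnorm"),
  ("0x00800000", "fminnorm"),
  ("0x80800000", "fminnorm"),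
  ("0x00800001", "fnorm"),
  ("0x80800001", "fnorm"),
  ("0x00855555", "fnorm"),
  ("0x80855555", "fnorm"),
  ("0x008AAAAA", "fnorm"),
  ("0x808AAAAA", "fnorm"),
  ("0x55000000", "fnorm"),
  ("0xD5000000", "fnorm"),
  ("0x2A000000", "fnorm"),
  ("0xAA000000", "fnorm"),
  ("0x7F7FFFFF", "fmaxnorm"),
  ("0xFF7FFFFF", "fmaxnorm"),
  ("0x7F800000", "finfinity"),
  ("0xFF800000", "finfinity"),
  ("0x7FC00000", "fdefaultnan"),
  ("0xFFC00000", "fdefaultnan"),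
  ("0x7FC00001", "fqnan"),
  ("0xFFC00001", "fqnan"),
  ("0x7FC55555", "fqnan"),
  ("0xFFC55555", "fqnan"),
  ("0x7F800001", "fsnan"),
  ("0xFF800001", "fsnan"),
  ("0x7FAAAAAA", "fsnan"),
  ("0xFFAAAAAA", "fsnan"),
  ("0x3F800000", "fone"),
  ("0xBF800000", "fone"),
  ("0x0000000000000000", "dzero"),
  ("0x8000000000000000", "dzero"),
  ("0x0000000000000001", "dminsubnorm"),
  ("0x8000000000000001", "dminsubnorm"),
  ("0x0000000000000002", "dsubnorm"),
  ("0x8000000000000002", "dsubnorm"),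
  ("0x000FFFFFFFFFFFFF", "dmaxsubnorm"),
  ("0x800FFFFFFFFFFFFF", "dmaxsubnorm"),
  ("0x0010000000000000", "dminnorm"),
  ("0x8010000000000000", "dminnorm"),
  ("0x0010000000000002", "dnorm"),
  ("0x8010000000000002", "dnorm"),
  ("0x7FEFFFFFFFFFFFFF", "dmaxnorm"),
  ("0xFFEFFFFFFFFFFFFF", "dmaxnorm"),
  ("0x7FF0000000000000", "dinfinity"),
  ("0xFFF0000000000000", "dinfinity"),
  ("0x7FF8000000000000", "ddefaultnan"),
  ("0xFFF8000000000000", "ddefaultnan"),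
  ("0x7FF8000000000001", "dqnan"),
  ("0xFFF8000000000001", "dqnan"),
  ("0x7FF0000000000001", "dsnan"),
  ("0xFFF0000000000001", "dsnan"),
  ("0x3FF0000000000000", "done"),
  ("0xBF80000000000000", "done")]

-- return _TABLE.get(num)
def num_explain_alt (num : String) : Option String := pvTable.get? num

-- ===== PRECONDITION & SPEC =====
def Spec_num_explain (num : String) (out : Option String) : Prop := out = num_explain_alt num
instance (num : String) (out : Option String) : Decidable (Spec_num_explain num out) := by unfold Spec_num_explain; infer_instance

-- ===== CLAIM (what is proved, stated in full; the proofs are below) =====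
def Claim_equal_num_explain : Prop := ∀ (num : String), Dom_num_explain num → Spec_num_explain num (num_explain num)

-- ===== LEMMAS AND PROOFS =====

-- looking up num in one group's flattened pairs (g.map (·, l)) followed by rest
theorem pvLookup_group (num l : String) (g : List String) (rest : List (String × String)) :
    (PySem.Dict.mk (g.map (fun h => (h, l)) ++ rest)).get? num =
      (if g.contains num then some l else (PySem.Dict.mk rest).get? num) := by
  induction g with
  | nil => simp
  | cons h t ih =>
    simp only [List.map_cons, List.cons_append, PySem.Dict.get?_mk_cons, List.contains_cons]
    rw [ih]
    by_cases hh : h == num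
    · have h2 : (num == h) = true := by
        simp only [beq_iff_eq] at hh ⊢; exact hh.symm
      simp [hh, h2]
    · have h2 : (num == h) = false := by
        simp only [beq_iff_eq] at hh
        simp only [beq_eq_false_iff_ne]; exact fun e => hh e.symm
      simp [hh, h2]

-- the scan over groups equals assoc lookup in the flattened pair list
theorem pvLoopA_eq_flat (num : String) (gs : List (List String × String)) :
    pvLoopA num gs = (PySem.Dict.mk (gs.flatMap (fun p => p.1.map (fun h => (h, p.2))))).get? num := by
  induction gs with
  | nil => simp [pvLoopA, PySem.Dict.get?]
  | cons p rest ih =>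
    simp only [pvLoopA, List.flatMap_cons, pvLookup_group, ih]

-- Source B's flat table is exactly A's groups flattened in order
theorem pvTable_eq_flat :
    pvTable = PySem.Dict.mk (pvGroups.flatMap (fun p => p.1.map (fun h => (h, p.2)))) := by
  rfl

-- ===== VERDICT (by name: the statement is the Claim_ definition above) =====
theorem num_explain_spec : Claim_equal_num_explain := by
  intro num _
  unfold Spec_num_explain num_explain num_explain_alt
  rw [pvTable_eq_flat, pvLoopA_eq_flat]
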